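-- pv_equiv track=rewrite | github.com/ChaseDuncan/neurel-wned-eval | src/create_wned_tas.py | get_end_offset
-- ===== SOURCE A (Python) =====
-- def get_end_offset(end_offsets, end_offset):
--     ''' End offsets are a little more complicated since some of the mentions are stemmed
--     and the given character length is according to the stemmed token and not the original.
--     For instance, 'Austrian' in text will be given as the mention 'Austria' of length 7.
--     This results in a key error since the token 'Austrian' in the text ends at start+8
--     not start+7. In the event of a KeyError we search for the next smallest end offset.
--     '''
--
--     try:
--         return end_offsets[end_offset]+1
--     except KeyError:
--         ''' There are more elegant ways to do this but the lists are small and my time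
--         is short...'''
--         found_offset=False
--         while not found_offset:
--             end_offset+=1
--             if end_offset in end_offsets.keys():
--                 found_offset = True
--         return end_offsets[end_offset]+1
-- ===== SOURCE B (Python) =====
-- def get_end_offset(end_offsets, end_offset):
--     key = min(k for k in end_offsets if k >= end_offset)
--     return end_offsets[key] + 1
-- ===== Notes on version B (the rewrite author's own statement) =====
-- stated objective: simpler
-- what changed: Replaces the try/except plus increment-until-hit loop with a single min over the keys >= end_offset (the smallest sufficient key), then one lookup.
-- outside the precondition, e.g. on get_end_offset({0: 5}, 3): A does not finish within the time limit, B raises ValueError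
import Mathlib
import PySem

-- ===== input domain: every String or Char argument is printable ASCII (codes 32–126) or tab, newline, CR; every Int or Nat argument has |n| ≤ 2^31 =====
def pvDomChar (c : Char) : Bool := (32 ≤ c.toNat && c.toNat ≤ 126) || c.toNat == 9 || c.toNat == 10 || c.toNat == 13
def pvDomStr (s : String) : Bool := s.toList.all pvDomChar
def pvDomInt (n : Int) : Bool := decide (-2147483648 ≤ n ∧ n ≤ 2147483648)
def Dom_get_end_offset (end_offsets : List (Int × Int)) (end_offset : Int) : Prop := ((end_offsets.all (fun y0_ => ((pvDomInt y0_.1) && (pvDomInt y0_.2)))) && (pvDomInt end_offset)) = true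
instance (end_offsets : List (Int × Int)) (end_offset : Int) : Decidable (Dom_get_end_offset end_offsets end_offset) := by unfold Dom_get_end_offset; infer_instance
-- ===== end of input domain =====

-- B replaces A's try/except plus increment-until-hit loop by one min over the keys ≥ end_offset
-- followed by a single lookup (objective: simpler).

-- ===== PORT A =====
-- first-match lookup in the association list (dict lookup)
def pvLookup (d : List (Int × Int)) (k : Int) : Option Int :=
  (d.find? (fun p => p.1 == k)).map Prod.snd

-- A's `while not found_offset` loop; fuel makes the recursion total (under
-- Pre_ the fuel is enough and is never exhausted).
def pvLoopA (d : List (Int × Int)) : Nat → Int → Int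
  | 0, _ => 0
  | n+1, k =>
      if (d.map Prod.fst).contains (k+1) then (pvLookup d (k+1)).getD 0 + 1
      else pvLoopA d n (k+1)

def get_end_offset (end_offsets : List (Int × Int)) (end_offset : Int) : Int :=
  match pvLookup end_offsets end_offset with
  | some v => v + 1          -- the try-branch: end_offsets[end_offset]+1
  | none =>                  -- KeyError: increment until a key is hit
      pvLoopA end_offsets
        (((end_offsets.map Prod.fst).foldl max end_offset - end_offset).toNat) end_offset

-- ===== PORT B =====
def get_end_offset_alt (end_offsets : List (Int × Int)) (end_offset : Int) : Int :=
  -- key = min(k for k in end_offsets if k >= end_offset); return end_offsets[key] + 1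
  match PySem.List.min? ((end_offsets.map Prod.fst).filter (fun k => decide (end_offset ≤ k))) (fun x => x) with
  | some m => (pvLookup end_offsets m).getD 0 + 1
  | none => 0                -- min() of an empty sequence: ValueError, outside Pre_

-- ===== PRECONDITION & SPEC =====
-- Pre_ requires some key ≥ end_offset: otherwise A's while-loop never terminates
-- (and B's min() raises ValueError).
def Pre_get_end_offset (end_offsets : List (Int × Int)) (end_offset : Int) : Prop :=
  ∃ p ∈ end_offsets, end_offset ≤ p.1
instance (end_offsets : List (Int × Int)) (end_offset : Int) : Decidable (Pre_get_end_offset end_offsets end_offset) := by unfold Pre_get_end_offset; infer_instance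
def pvWitness_get_end_offset : (List (Int × Int)) × Int := ([(3, 7), (6, 11)], 4)

def Spec_get_end_offset (end_offsets : List (Int × Int)) (end_offset : Int) (out : Int) : Prop := out = get_end_offset_alt end_offsets end_offset
instance (end_offsets : List (Int × Int)) (end_offset : Int) (out : Int) : Decidable (Spec_get_end_offset end_offsets end_offset out) := by unfold Spec_get_end_offset; infer_instance

-- ===== CLAIM (what is proved, stated in full; the proofs are below) =====
def Claim_equal_get_end_offset : Prop := ∀ (end_offsets : List (Int × Int)) (end_offset : Int), Dom_get_end_offset end_offsets end_offset → Pre_get_end_offset end_offsets end_offset → Spec_get_end_offset end_offsets end_offset (get_end_offset end_offsets end_offset)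

-- ===== LEMMAS AND PROOFS =====

theorem pvLookup_eq_none_iff (d : List (Int × Int)) (k : Int) :
    pvLookup d k = none ↔ k ∉ d.map Prod.fst := by
  unfold pvLookup
  rw [Option.map_eq_none_iff, List.find?_eq_none]
  simp only [beq_iff_eq, List.mem_map]
  constructor
  · rintro h ⟨⟨a, b⟩, hmem, heq⟩
    exact h _ hmem heq
  · intro h p hp hpk
    exact h ⟨p, hp, hpk⟩

-- if e+1 is not a key, filtering keys by (e+1 ≤ ·) and by (e+2 ≤ ·) agree
theorem pvFilter_shift (ks : List Int) (e : Int) (h : (e + 1) ∉ ks) :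
    ks.filter (fun k => decide (e + 1 ≤ k)) = ks.filter (fun k => decide (e + 2 ≤ k)) := by
  apply List.filter_congr
  intro x hx
  have : x ≠ e + 1 := fun heq => h (heq ▸ hx)
  by_cases h2 : e + 2 ≤ x <;> simp_all <;> omega

-- a min over a filtered list that contains its lower bound c is c
theorem pvMin_filter_self (ks : List Int) (c : Int) (hc : c ∈ ks) (m : Int)
    (hm : PySem.List.min? (ks.filter (fun k => decide (c ≤ k))) (fun x => x) = some m) :
    m = c := by
  have hmem : m ∈ ks.filter (fun k => decide (c ≤ k)) := PySem.List.min?_mem hm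
  have h1 : c ≤ m := by
    have := List.of_mem_filter hmem; simpa using this
  have h2 : m ≤ c := by
    have := PySem.List.min?_isMin hm c (by simp [List.mem_filter, hc])
    simpa using this
  omega

-- A's search loop returns the value at the least key > e (plus 1), which is
-- what B computes via the min over keys ≥ e+1.
theorem pvLoopA_eq (d : List (Int × Int)) :
    ∀ (n : Nat) (e : Int), (∃ k ∈ d.map Prod.fst, e < k ∧ k ≤ e + n) →
    ∀ m, PySem.List.min? ((d.map Prod.fst).filter (fun k => decide (e + 1 ≤ k))) (fun x => x) = some m →
    pvLoopA d n e = (pvLookup d m).getD 0 + 1 := by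
  intro n
  induction n with
  | zero =>
      intro e ⟨k, _, hk1, hk2⟩
      omega
  | succ n ih =>
      intro e ⟨k, hkmem, hk1, hk2⟩ m hm
      by_cases hc : (e + 1) ∈ d.map Prod.fst
      · have hm' : m = e + 1 := pvMin_filter_self _ _ hc _ hm
        have hct : ((d.map Prod.fst).contains (e + 1)) = true := by
          simpa [List.contains_iff_mem] using hc
        simp only [pvLoopA, hct, if_true, hm']
      · have hfe : ((d.map Prod.fst).filter (fun k => decide (e + 1 ≤ k)))
            = ((d.map Prod.fst).filter (fun k => decide (e + 1 + 1 ≤ k))) := by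
          have := pvFilter_shift (d.map Prod.fst) e hc
          simpa [show e + 2 = e + 1 + 1 by ring] using this
        have hknew : e + 1 < k := by
          rcases eq_or_lt_of_le (show e + 1 ≤ k by omega) with h | h
          · exact absurd (h ▸ hkmem) hc
          · exact h
        have := ih (e + 1) ⟨k, hkmem, hknew, by omega⟩ m (by rw [← hfe]; exact hm)
        have hcontains : ((d.map Prod.fst).contains (e + 1)) = false := by
          simp [hc]
        simp only [pvLoopA, hcontains, Bool.false_eq_true, if_false]
        exact this

-- ===== VERDICT (by name: the statement is the Claim_ definition above) =====
theorem get_end_offset_spec : Claim_equal_get_end_offset := by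
  intro d e _ ⟨p, hp, hpe⟩
  unfold Spec_get_end_offset get_end_offset get_end_offset_alt
  have hkeys : p.1 ∈ d.map Prod.fst := List.mem_map_of_mem hp
  cases hlook : pvLookup d e with
  | some v =>
      -- e is itself a key: B's min over keys ≥ e is e
      have he : e ∈ d.map Prod.fst := by
        by_contra h
        simp [(pvLookup_eq_none_iff d e).mpr h] at hlook
      have hne : ((d.map Prod.fst).filter (fun k => decide (e ≤ k))) ≠ [] := by
        intro h
        have : e ∈ (d.map Prod.fst).filter (fun k => decide (e ≤ k)) :=
          List.mem_filter.mpr ⟨he, by simp⟩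
        rw [h] at this
        simp at this
      cases hm : PySem.List.min? ((d.map Prod.fst).filter (fun k => decide (e ≤ k))) (fun x => x) with
      | none => exact absurd ((PySem.List.min?_eq_none_iff _ _).mp hm) hne
      | some m =>
          have hme : m = e := pvMin_filter_self _ _ he _ hm
          simp [hme, hlook]
  | none =>
      -- e is not a key: A's loop and B's min both land on the least key > e
      have he : e ∉ d.map Prod.fst := (pvLookup_eq_none_iff d e).mp hlook
      have hlt : e < p.1 := by
        rcases eq_or_lt_of_le hpe with h | h
        · exact absurd (h ▸ hkeys) he
        · exact h
      -- B's filter (e ≤ ·) agrees with filter (e+1 ≤ ·) since e is not a key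
      have hfe : ((d.map Prod.fst).filter (fun k => decide (e ≤ k)))
          = ((d.map Prod.fst).filter (fun k => decide (e + 1 ≤ k))) := by
        apply List.filter_congr
        intro x hx
        have : x ≠ e := fun heq => he (heq ▸ hx)
        by_cases h2 : e + 1 ≤ x <;> simp_all <;> omega
      have hne : ((d.map Prod.fst).filter (fun k => decide (e + 1 ≤ k))) ≠ [] := by
        intro h
        have : p.1 ∈ (d.map Prod.fst).filter (fun k => decide (e + 1 ≤ k)) :=
          List.mem_filter.mpr ⟨hkeys, by simp; omega⟩
        rw [h] at this
        simp at this
      cases hm : PySem.List.min? ((d.map Prod.fst).filter (fun k => decide (e + 1 ≤ k))) (fun x => x) with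
      | none => exact absurd ((PySem.List.min?_eq_none_iff _ _).mp hm) hne
      | some m =>
          have hbound : p.1 ≤ e + ↑(((d.map Prod.fst).foldl max e - e).toNat) := by
            have hmax := (PySem.List.le_foldl_max (d.map Prod.fst) e).2 p.1 hkeys
            omega
          have := pvLoopA_eq d (((d.map Prod.fst).foldl max e - e).toNat) e
            ⟨p.1, hkeys, hlt, hbound⟩ m hm
          simp only [hfe, hm]
          simpa using this
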